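-- pv_equiv track=rewrite | github.com/felipealmeida-id/path-planning | 2labelTOcartesian.py | convert_to_coordinates
-- ===== SOURCE A (Python) =====
-- def convert_to_coordinates(movements):
--     x, y = 0, 0
--     coordinates = [[x, y]]
--
--     for move in movements:
--         x += move[0]
--         y += move[1]
--         coordinates.append([x, y])
--
--     return coordinates
-- ===== SOURCE B (Python) =====
-- def convert_to_coordinates(movements):
--     moves = list(movements)
--
--     def prefix(vals):
--         total = 0
--         out = [0]
--         for v in vals:
--             total += v
--             out.append(total)
--         return out
--
--     xs = prefix(m[0] for m in moves)
--     ys = prefix(m[1] for m in moves)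
--     return [[x, y] for x, y in zip(xs, ys)]
-- ===== Notes on version B (the rewrite author's own statement) =====
-- stated objective: alternative
-- what changed: Replaces A's single coupled (x,y) running-sum loop with two independent per-axis prefix-sum passes that are then zipped into [x,y] pairs.
import Mathlib
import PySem

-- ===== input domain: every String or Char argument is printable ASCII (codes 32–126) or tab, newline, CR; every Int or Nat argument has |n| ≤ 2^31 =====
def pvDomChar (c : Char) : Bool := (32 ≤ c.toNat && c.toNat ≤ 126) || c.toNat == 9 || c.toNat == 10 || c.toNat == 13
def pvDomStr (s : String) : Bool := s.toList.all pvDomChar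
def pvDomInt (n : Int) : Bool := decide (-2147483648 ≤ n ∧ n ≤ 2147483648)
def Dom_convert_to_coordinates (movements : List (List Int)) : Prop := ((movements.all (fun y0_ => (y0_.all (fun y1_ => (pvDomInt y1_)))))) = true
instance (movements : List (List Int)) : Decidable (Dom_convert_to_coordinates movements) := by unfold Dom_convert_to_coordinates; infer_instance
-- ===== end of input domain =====

-- B replaces A's coupled (x,y) running-sum loop with two independent per-axis prefix-sum passes zipped into pairs (objective: alternative decomposition).


-- ===== PORT A =====
-- First (resp. second) entry of a move: move[0] / move[1] (pyGet?; getD 0 unreachable inside Pre_).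
def pvG0 (m : List Int) : Int := (PySem.List.pyGet? m 0).getD 0
def pvG1 (m : List Int) : Int := (PySem.List.pyGet? m 1).getD 0

-- A's single loop carrying (x, y, coordinates); move[0]/move[1] via pyGet? (getD 0 is unreachable inside Pre_).
def convert_to_coordinates (movements : List (List Int)) : List (List Int) :=
  (movements.foldl
    (fun (st : Int × Int × List (List Int)) move =>
      let x := st.1 + pvG0 move
      let y := st.2.1 + pvG1 move
      (x, y, st.2.2 ++ [[x, y]]))
    (0, 0, [[0, 0]])).2.2

-- ===== PORT B =====
-- B's helper prefix: loop carrying (total, out), out starts [0].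
def pvPrefix (vals : List Int) : List Int :=
  (vals.foldl (fun (st : Int × List Int) v => (st.1 + v, st.2 ++ [st.1 + v])) (0, [0])).2

def convert_to_coordinates_alt (movements : List (List Int)) : List (List Int) :=
  let xs := pvPrefix (movements.map pvG0)
  let ys := pvPrefix (movements.map pvG1)
  List.zipWith (fun x y => [x, y]) xs ys

-- ===== PRECONDITION & SPEC =====
-- Pre_ excludes exactly the inputs where Python A raises IndexError (a move with fewer than 2 entries).
def Pre_convert_to_coordinates (movements : List (List Int)) : Prop :=
  ∀ m ∈ movements, 2 ≤ m.length
instance (movements : List (List Int)) : Decidable (Pre_convert_to_coordinates movements) := by unfold Pre_convert_to_coordinates; infer_instance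
def pvWitness_convert_to_coordinates : List (List Int) := [[1, 2], [3, -4]]

def Spec_convert_to_coordinates (movements : List (List Int)) (out : List (List Int)) : Prop := out = convert_to_coordinates_alt movements
instance (movements : List (List Int)) (out : List (List Int)) : Decidable (Spec_convert_to_coordinates movements out) := by unfold Spec_convert_to_coordinates; infer_instance

-- ===== CLAIM (what is proved, stated in full; the proofs are below) =====
def Claim_equal_convert_to_coordinates : Prop := ∀ (movements : List (List Int)), Dom_convert_to_coordinates movements → Pre_convert_to_coordinates movements → Spec_convert_to_coordinates movements (convert_to_coordinates movements)

-- ===== LEMMAS AND PROOFS =====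

-- B's prefix-fold: generalized prepend of the output accumulator.
lemma foldP_acc (vs : List Int) : ∀ (t : Int) (out : List Int),
    (vs.foldl (fun (st : Int × List Int) v => (st.1 + v, st.2 ++ [st.1 + v])) (t, out)).2
    = out ++ (vs.foldl (fun (st : Int × List Int) v => (st.1 + v, st.2 ++ [st.1 + v])) (t, [])).2 := by
  induction vs with
  | nil => intro t out; simp
  | cons v vs ih =>
    intro t out
    simp only [List.foldl_cons, List.nil_append]
    rw [ih (t + v) (out ++ [t + v]), ih (t + v) [t + v], List.append_assoc]

-- A's loop: result list with generalized accumulator.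
lemma foldA_acc (ms : List (List Int)) : ∀ (x y : Int) (acc : List (List Int)),
    (ms.foldl (fun (st : Int × Int × List (List Int)) move =>
        let x' := st.1 + pvG0 move
        let y' := st.2.1 + pvG1 move
        (x', y', st.2.2 ++ [[x', y']])) (x, y, acc)).2.2
    = acc ++ List.zipWith (fun a b => [a, b])
        ((ms.map pvG0).foldl (fun (st : Int × List Int) v => (st.1 + v, st.2 ++ [st.1 + v])) (x, [])).2
        ((ms.map pvG1).foldl (fun (st : Int × List Int) v => (st.1 + v, st.2 ++ [st.1 + v])) (y, [])).2 := by
  induction ms with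
  | nil => intro x y acc; simp
  | cons m ms ih =>
    intro x y acc
    simp only [List.map_cons, List.foldl_cons, List.nil_append]
    rw [ih (x + pvG0 m) (y + pvG1 m) (acc ++ [[x + pvG0 m, y + pvG1 m]]),
        foldP_acc (ms.map pvG0) (x + pvG0 m) [x + pvG0 m],
        foldP_acc (ms.map pvG1) (y + pvG1 m) [y + pvG1 m]]
    simp

-- ===== VERDICT (by name: the statement is the Claim_ definition above) =====
theorem convert_to_coordinates_spec : Claim_equal_convert_to_coordinates := by
  intro movements _ _
  unfold Spec_convert_to_coordinates convert_to_coordinates convert_to_coordinates_alt pvPrefix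
  rw [foldA_acc movements 0 0 [[0, 0]],
      foldP_acc (movements.map pvG0) 0 [0],
      foldP_acc (movements.map pvG1) 0 [0]]
  simp
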